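-- pv_equiv track=rewrite | github.com/suhyeon7675/python_algorithm | 2023-05-29/A로 B 만들기/6_FINE.py | solution
-- ===== SOURCE A (Python) =====
-- def solution(before, after):
--     for i in range(len(before)):
--         for j in range(len(after)):
--             if before[i] == after[j]:
--                 after = after.replace(after[j], ' ')
--                 break
--             elif j == len(after)-1:
--                 return 0
--     return 1
-- ===== SOURCE B (Python) =====
-- def solution(before, after):
--     distinct = set(before)
--     if len(distinct) != len(before):
--         return 0
--     return 1 if distinct <= set(after) else 0
-- ===== Notes on version B (the rewrite author's own statement) =====
-- stated objective: simpler
-- what changed: B replaces A's stateful simulation (a nested index scan over `after` plus replace-with-' ' consumption) by a closed-form test: before's characters are pairwise distinct and form a subset of after's characters.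
-- intended difference: On inputs where A succeeds only by accident - empty `after` with nonempty `before`, or `before` whose non-space characters are distinct and all in `after` but whose spaces exceed what `after` supplies (they match the ' ' placeholders A's replace() writes) - A returns 1 while B returns 0, the intended answer since before's characters are then not all present and distinct in after. — e.g. on solution("a", ""): A returns 1, B returns 0
import Mathlib
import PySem

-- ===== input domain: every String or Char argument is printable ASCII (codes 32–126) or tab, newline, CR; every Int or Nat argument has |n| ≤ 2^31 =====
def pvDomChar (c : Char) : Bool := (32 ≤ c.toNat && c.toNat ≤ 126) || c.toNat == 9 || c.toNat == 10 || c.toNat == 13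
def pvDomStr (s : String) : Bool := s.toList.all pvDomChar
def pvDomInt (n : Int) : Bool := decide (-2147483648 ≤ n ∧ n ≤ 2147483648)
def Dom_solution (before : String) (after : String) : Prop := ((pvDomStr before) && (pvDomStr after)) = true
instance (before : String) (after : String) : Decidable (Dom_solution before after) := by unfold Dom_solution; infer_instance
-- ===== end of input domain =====

-- B replaces A's stateful scan-and-replace simulation by a closed-form test (before's
-- characters distinct and a subset of after's); where A returns 1 only through its
-- replace-with-' ' placeholders or an empty `after`, B returns the intended 0 (see D_solution).

-- ===== PORT A =====
-- after.replace(after[j], ' ') — exact as a map since the pattern is a single character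
def pvReplaceChar (c : Char) (aft : List Char) : List Char :=
  aft.map (fun x => if x = c then ' ' else x)

-- the inner 'for j in range(len(after))' loop: some true = match found (break),
-- some false = 'return 0' taken at j = len(after)-1, none = loop body never ran (after empty)
def pvInner (c : Char) (full : List Char) : List Char → Nat → Option Bool
  | [], _ => none
  | x :: xs, j =>
    if c = x then some true
    else if j = full.length - 1 then some false
    else pvInner c full xs (j + 1)

-- the outer 'for i in range(len(before))' loop, with `after` as mutable state
def pvOuter : List Char → List Char → Int
  | [], _ => 1
  | c :: rest, aft =>
    match pvInner c aft aft 0 with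
    | some true => pvOuter rest (pvReplaceChar c aft)
    | some false => 0
    | none => pvOuter rest aft

def solution (before : String) (after : String) : Int :=
  pvOuter before.toList after.toList

-- ===== PORT B =====
def solution_alt (before : String) (after : String) : Int :=
  let distinct := PySem.Set.ofList before.toList
  if PySem.Set.len distinct ≠ PySem.Str.len before then 0
  else if PySem.Set.issubset distinct (PySem.Set.ofList after.toList) then 1 else 0

-- ===== PRECONDITION & SPEC =====
-- On inputs where A succeeds only by accident — empty `after` with nonempty `before`, or
-- `before` whose non-space characters are distinct and all in `after` but whose spaces exceed
-- what `after` supplies (they match the ' ' placeholders A's replace() writes) — A returns 1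
-- while B returns 0, the intended answer since before's characters are then not all present
-- and distinct in after.
def D_solution (before : String) (after : String) : Prop :=
  (after.toList = [] ∧ before.toList ≠ []) ∨
  (after.toList ≠ [] ∧ (before.toList.filter (· ≠ ' ')).Nodup ∧
    (∀ c ∈ before.toList, c ≠ ' ' → c ∈ after.toList) ∧
    ((' ' ∈ after.toList ∧ 2 ≤ before.toList.count ' ') ∨
     (' ' ∉ after.toList ∧ 1 ≤ before.toList.count ' ' ∧ before.toList.head? ≠ some ' ')))
instance (before : String) (after : String) : Decidable (D_solution before after) := by
  unfold D_solution; infer_instance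

def Spec_solution (before : String) (after : String) (out : Int) : Prop :=
  ¬ D_solution before after → out = solution_alt before after
instance (before : String) (after : String) (out : Int) : Decidable (Spec_solution before after out) := by
  unfold Spec_solution; infer_instance

def pvDiffWitness_solution : String × String := ("a", "")
def pvDiffWitnessOut_solution : Int × Int := (1, 0)

-- ===== CLAIM =====
def Claim_unchanged_solution : Prop :=
  ∀ (before : String) (after : String), Dom_solution before after →
    Spec_solution before after (solution before after)

def Claim_changed_solution : Prop :=
  Dom_solution (pvDiffWitness_solution.1) (pvDiffWitness_solution.2) ∧
  D_solution (pvDiffWitness_solution.1) (pvDiffWitness_solution.2) ∧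
  solution (pvDiffWitness_solution.1) (pvDiffWitness_solution.2) = pvDiffWitnessOut_solution.1 ∧
  solution_alt (pvDiffWitness_solution.1) (pvDiffWitness_solution.2) = pvDiffWitnessOut_solution.2 ∧
  pvDiffWitnessOut_solution.1 ≠ pvDiffWitnessOut_solution.2

def Claim_exact_solution : Prop :=
  ∀ (before : String) (after : String), Dom_solution before after →
    D_solution before after → solution before after ≠ solution_alt before after

-- ===== LEMMAS AND PROOFS =====

-- the condition A's loop actually checks (proof-side characterisation of pvOuter)
abbrev pvGood (bs aft : List Char) : Prop :=
  (bs.filter (· ≠ ' ')).Nodup ∧ (∀ c ∈ bs, c ≠ ' ' → c ∈ aft) ∧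
  (bs.head? = some ' ' → ' ' ∈ aft)

theorem pvInner_eq (c : Char) (full : List Char) :
    ∀ (rem : List Char) (j : Nat), rem ≠ [] → j + rem.length = full.length →
      pvInner c full rem j = some (decide (c ∈ rem)) := by
  intro rem
  induction rem with
  | nil => intro j h _; exact absurd rfl h
  | cons x xs ih =>
    intro j _ hlen
    by_cases hcx : c = x
    · simp [pvInner, hcx]
    · cases xs with
      | nil =>
        have hj : j = full.length - 1 := by simp at hlen; omega
        simp [pvInner, hcx, hj]
      | cons y ys =>
        have hj : j ≠ full.length - 1 := by simp at hlen; omega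
        have hrec := ih (j + 1) (by simp) (by simp at hlen ⊢; omega)
        rw [show pvInner c full (x :: y :: ys) j =
              (if c = x then some true else if j = full.length - 1 then some false
               else pvInner c full (y :: ys) (j + 1)) from rfl,
            if_neg hcx, if_neg hj, hrec]
        simp [hcx]

theorem mem_pvReplaceChar (c x : Char) (aft : List Char) (hx : x ≠ ' ') :
    x ∈ pvReplaceChar c aft ↔ x ∈ aft ∧ x ≠ c := by
  simp only [pvReplaceChar, List.mem_map]
  constructor
  · rintro ⟨y, hy, hfy⟩
    by_cases hyc : y = c
    · subst hyc; simp at hfy; exact absurd hfy.symm hx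
    · simp [hyc] at hfy; subst hfy; exact ⟨hy, hyc⟩
  · rintro ⟨hmem, hne⟩
    exact ⟨x, hmem, by simp [hne]⟩

theorem space_mem_pvReplaceChar (c : Char) (aft : List Char) (hc : c ∈ aft) :
    ' ' ∈ pvReplaceChar c aft := by
  simp only [pvReplaceChar, List.mem_map]
  exact ⟨c, hc, by simp⟩

theorem pvOuter_char : ∀ (bs aft : List Char), aft ≠ [] →
    pvOuter bs aft = if pvGood bs aft then 1 else 0 := by
  intro bs
  induction bs with
  | nil =>
    intro aft _
    simp [pvOuter, pvGood]
  | cons c rest ih =>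
    intro aft haft
    have hinner := pvInner_eq c aft aft 0 haft (by omega)
    by_cases hc : c ∈ aft
    · have haft' : pvReplaceChar c aft ≠ [] := by
        simp [pvReplaceChar]; exact haft
      have hrec := ih (pvReplaceChar c aft) haft'
      have hstep : pvOuter (c :: rest) aft = pvOuter rest (pvReplaceChar c aft) := by
        simp only [pvOuter, hinner, hc, decide_true]
      rw [hstep, hrec]
      have hiff : pvGood rest (pvReplaceChar c aft) ↔ pvGood (c :: rest) aft := by
        unfold pvGood
        by_cases hcs : c = ' '
        · subst hcs
          constructor
          · rintro ⟨h1, h2, _⟩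
            refine ⟨by simpa using h1, ?_, fun _ => hc⟩
            intro d hd hds
            rcases List.mem_cons.mp hd with rfl | hd'
            · exact absurd rfl hds
            · exact ((mem_pvReplaceChar ' ' d aft hds).mp (h2 d hd' hds)).1
          · rintro ⟨h1, h2, _⟩
            refine ⟨by simpa using h1, ?_, fun _ => space_mem_pvReplaceChar _ _ hc⟩
            intro d hd hds
            exact (mem_pvReplaceChar ' ' d aft hds).mpr ⟨h2 d (by simp [hd]) hds, hds⟩
        · constructor
          · rintro ⟨h1, h2, _⟩
            have hnotin : c ∉ rest.filter (· ≠ ' ') := by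
              intro hmem
              have hds : c ≠ ' ' := hcs
              have := (mem_pvReplaceChar c c aft hds).mp
                (h2 c (List.mem_filter.mp hmem).1 hds)
              exact this.2 rfl
            refine ⟨?_, ?_, ?_⟩
            · simpa [List.filter_cons, hcs] using And.intro hnotin h1
            · intro d hd hds
              rcases List.mem_cons.mp hd with rfl | hd'
              · exact hc
              · exact ((mem_pvReplaceChar c d aft hds).mp (h2 d hd' hds)).1
            · intro hhd; simp at hhd; exact absurd hhd hcs
          · rintro ⟨h1, h2, _⟩
            have h1' : c ∉ rest.filter (· ≠ ' ') ∧ (rest.filter (· ≠ ' ')).Nodup := by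
              simpa [List.filter_cons, hcs] using h1
            refine ⟨h1'.2, ?_, fun hhd => space_mem_pvReplaceChar _ _ hc⟩
            intro d hd hds
            by_cases hdc : d = c
            · subst hdc
              exact absurd (List.mem_filter.mpr ⟨hd, by simpa using hds⟩) h1'.1
            · exact (mem_pvReplaceChar c d aft hds).mpr ⟨h2 d (by simp [hd]) hds, hdc⟩
      rw [if_congr hiff rfl rfl]
    · have hstep : pvOuter (c :: rest) aft = 0 := by
        simp only [pvOuter, hinner, hc, decide_false]
      rw [hstep]
      have hng : ¬ pvGood (c :: rest) aft := by
        rintro ⟨_, h2, h3⟩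
        by_cases hcs : c = ' '
        · subst hcs; exact hc (h3 (by simp))
        · exact hc (h2 c (by simp) hcs)
      rw [if_neg hng]

theorem pvOuter_nil_right : ∀ (bs : List Char), pvOuter bs [] = 1 := by
  intro bs
  induction bs with
  | nil => rfl
  | cons c rest ih => simp [pvOuter, pvInner, ih]

theorem pvOfList_length_eq_iff (bs : List Char) :
    (PySem.Set.ofList bs : List Char).length = bs.length ↔ bs.Nodup := by
  have hcard : (PySem.Set.ofList bs : List Char).length = bs.toFinset.card := by
    rw [← List.toFinset_card_of_nodup (PySem.Set.nodup_ofList bs)]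
    congr 1
    ext x
    simp [PySem.Set.mem_ofList]
  rw [hcard, List.card_toFinset]
  constructor
  · intro h
    rw [← List.dedup_eq_self]
    exact (List.dedup_sublist bs).eq_of_length h
  · intro h
    rw [List.dedup_eq_self.mpr h]

theorem solution_alt_char (before after : String) :
    solution_alt before after =
      if before.toList.Nodup ∧ (∀ c ∈ before.toList, c ∈ after.toList) then 1 else 0 := by
  unfold solution_alt
  have hlen : (PySem.Set.len (PySem.Set.ofList before.toList) = PySem.Str.len before) ↔
      before.toList.Nodup := by
    rw [PySem.Set.len_eq, PySem.Str.len_eq, Int.natCast_inj]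
    exact pvOfList_length_eq_iff before.toList
  have hsub : (PySem.Set.issubset (PySem.Set.ofList before.toList)
      (PySem.Set.ofList after.toList) = true) ↔ (∀ c ∈ before.toList, c ∈ after.toList) := by
    rw [PySem.Set.issubset_iff]
    constructor
    · intro h c hc
      exact (PySem.Set.mem_ofList after.toList c).mp
        (h c ((PySem.Set.mem_ofList before.toList c).mpr hc))
    · intro h c hc
      exact (PySem.Set.mem_ofList after.toList c).mpr
        (h c ((PySem.Set.mem_ofList before.toList c).mp hc))
  split_ifs <;> simp_all

theorem nodup_iff_filter_count (bs : List Char) :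
    bs.Nodup ↔ (bs.filter (· ≠ ' ')).Nodup ∧ bs.count ' ' ≤ 1 := by
  constructor
  · intro h
    exact ⟨h.filter _, (List.nodup_iff_count_le_one.mp h) ' '⟩
  · rintro ⟨hf, hc⟩
    rw [List.nodup_iff_count_le_one]
    intro x
    by_cases hx : x = ' '
    · subst hx; exact hc
    · have : (bs.filter (· ≠ ' ')).count x = bs.count x := by
        rw [List.count_filter]
        simp [hx]
      rw [← this]
      exact (List.nodup_iff_count_le_one.mp hf) x

-- ===== VERDICT =====
theorem solution_spec : Claim_unchanged_solution := by
  intro before after _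
  unfold Spec_solution
  intro hnD
  unfold D_solution at hnD
  rw [solution_alt_char]
  by_cases haft : after.toList = []
  · have hbef : before.toList = [] := by
      by_contra hb
      exact hnD (Or.inl ⟨haft, hb⟩)
    unfold solution
    rw [hbef, haft]
    simp [pvOuter, List.Nodup]
  · unfold solution
    rw [pvOuter_char before.toList after.toList haft]
    have hiff : pvGood before.toList after.toList ↔
        (before.toList.Nodup ∧ ∀ c ∈ before.toList, c ∈ after.toList) := by
      constructor
      · rintro ⟨hF, hS, hH⟩
        have hD2 : ¬ ((' ' ∈ after.toList ∧ 2 ≤ before.toList.count ' ') ∨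
            (' ' ∉ after.toList ∧ 1 ≤ before.toList.count ' ' ∧
             before.toList.head? ≠ some ' ')) := by
          intro hor
          exact hnD (Or.inr ⟨haft, hF, hS, hor⟩)
        push Not at hD2
        obtain ⟨hX, hY⟩ := hD2
        by_cases hsp : ' ' ∈ after.toList
        · have hk : before.toList.count ' ' ≤ 1 := by
            have := hX hsp; omega
          refine ⟨(nodup_iff_filter_count _).mpr ⟨hF, hk⟩, ?_⟩
          intro c hc
          by_cases hcs : c = ' '
          · subst hcs; exact hsp
          · exact hS c hc hcs
        · have hk : before.toList.count ' ' = 0 := by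
            by_contra hk0
            have h1k : 1 ≤ before.toList.count ' ' := by omega
            have hhd : before.toList.head? = some ' ' := by
              have := hY hsp h1k
              simpa using this
            exact hsp (hH hhd)
          refine ⟨(nodup_iff_filter_count _).mpr ⟨hF, by omega⟩, ?_⟩
          intro c hc
          by_cases hcs : c = ' '
          · subst hcs
            exact absurd (List.count_pos_iff.mpr hc) (by omega)
          · exact hS c hc hcs
      · rintro ⟨hN, hS⟩
        refine ⟨((nodup_iff_filter_count _).mp hN).1, fun c hc _ => hS c hc, ?_⟩
        intro hhd
        have hsp : ' ' ∈ before.toList := by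
          cases hb : before.toList with
          | nil => rw [hb] at hhd; simp at hhd
          | cons x xs =>
            rw [hb] at hhd
            simp at hhd
            simp [hhd]
        exact hS ' ' hsp
    rw [if_congr hiff rfl rfl]

theorem solution_changed : Claim_changed_solution := by
  unfold Claim_changed_solution; decide

theorem solution_tight : Claim_exact_solution := by
  intro before after _ hD
  rw [solution_alt_char]
  unfold D_solution at hD
  rcases hD with ⟨haft, hbef⟩ | ⟨haft, hF, hS, hor⟩
  · unfold solution
    rw [haft, pvOuter_nil_right]
    rw [if_neg]
    · decide
    rintro ⟨_, hall⟩
    cases hb : before.toList with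
    | nil => exact hbef hb
    | cons x xs => simpa using hall x (by rw [hb]; simp)
  · unfold solution
    rw [pvOuter_char before.toList after.toList haft]
    have hgood : pvGood before.toList after.toList := by
      refine ⟨hF, hS, ?_⟩
      intro hhd
      rcases hor with ⟨hsp, _⟩ | ⟨_, _, hne⟩
      · exact hsp
      · exact absurd hhd hne
    have hbad : ¬ (before.toList.Nodup ∧ ∀ c ∈ before.toList, c ∈ after.toList) := by
      rintro ⟨hN, hall⟩
      rcases hor with ⟨_, h2⟩ | ⟨hsp, h1, _⟩
      · have := ((nodup_iff_filter_count _).mp hN).2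
        omega
      · have hmem : ' ' ∈ before.toList := List.count_pos_iff.mp (by omega)
        exact hsp (hall ' ' hmem)
    rw [if_pos hgood, if_neg hbad]
    decide
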